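-- pv_equiv track=rewrite | github.com/SSAFY-6-1-3/Algorithm | 0118/p_12979_somi.py | solution
-- ===== SOURCE A (Python) =====
-- def solution(n, stations, w):
--
--     station_area = [(0,0)]  # 전파가 닿는 지역(시작점, 끝점)
--     for station in stations:  # stations는 오름차순으로 정렬됨
--         start = station - w
--         if start < 0:
--             start = 0
--         end = station + w
--         if end > n:
--             end = n
--         station_area.append((start, end))
--     station_area.append((n + 1, n + 1))
--
--     answer = 0
--     for i in range(len(station_area) - 1):
--         # 전파가 안 닿는 지역의 거리 / 전파전달 범위
--         d, m = divmod(station_area[i + 1][0] - (station_area[i][1] + 1), (w * 2 + 1))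
--
--         if m >= 1:
--             answer += d + 1
--         else:
--             answer += d
--
--     return answer
-- ===== SOURCE B (Python) =====
-- def solution(n, stations, w):
--     base = 2 * w + 1
--
--     def cnt(gap):
--         # transmitters needed for a gap of `gap` uncovered positions
--         q = gap // base
--         return q + (1 if gap - q * base > 0 else 0)
--
--     def rec(lst):
--         # lst nonempty; returns (first coverage start, last coverage end,
--         # transmitters for the gaps strictly inside lst)
--         if len(lst) == 1:
--             return max(lst[0] - w, 0), min(lst[0] + w, n), 0
--         mid = len(lst) // 2
--         fl, el, cl = rec(lst[:mid])
--         fr, er, cr = rec(lst[mid:])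
--         return fl, er, cl + cr + cnt(fr - el - 1)
--
--     if not stations:
--         return cnt(n + 1 - 1)
--     f, e, c = rec(stations)
--     return c + cnt(f - 0 - 1) + cnt(n + 1 - e - 1)
-- ===== Notes on version B (the rewrite author's own statement) =====
-- stated objective: alternative
-- what changed: Replaces A's two staged loops (build a sentinel-bracketed interval list, then scan adjacent index pairs with divmod) by a divide-and-conquer recursion that splits the station list in half, returns (first coverage start, last coverage end, inner transmitter count) per half and combines with one boundary-gap term; sentinels are handled once at the top level.
import Mathlib
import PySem

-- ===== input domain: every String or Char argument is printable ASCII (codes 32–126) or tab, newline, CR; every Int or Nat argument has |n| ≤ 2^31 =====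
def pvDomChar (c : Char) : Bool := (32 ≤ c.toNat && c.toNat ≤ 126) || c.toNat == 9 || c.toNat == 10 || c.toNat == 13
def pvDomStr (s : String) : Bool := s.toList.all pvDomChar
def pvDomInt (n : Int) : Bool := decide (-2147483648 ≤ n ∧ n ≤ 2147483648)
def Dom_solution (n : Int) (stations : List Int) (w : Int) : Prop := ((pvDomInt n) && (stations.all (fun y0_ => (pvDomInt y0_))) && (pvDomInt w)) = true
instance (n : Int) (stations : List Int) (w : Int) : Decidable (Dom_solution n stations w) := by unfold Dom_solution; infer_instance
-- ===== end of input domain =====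

-- B replaces A's build-interval-list-then-scan-adjacent-pairs loops by a divide-and-conquer
-- recursion over the station list (alternative decomposition; same asymptotic cost).

-- ===== PORT A =====
def solution (n : Int) (stations : List Int) (w : Int) : Int :=
  let stationArea :=
    stations.foldl (fun acc station =>
      let start := station - w
      let start := if start < 0 then (0 : Int) else start
      let e := station + w
      let e := if e > n then n else e
      acc ++ [(start, e)]) [((0 : Int), (0 : Int))]
  let stationArea := stationArea ++ [(n + 1, n + 1)]
  (PySem.List.pyRange 0 ((stationArea.length : Int) - 1) 1).foldl
    (fun answer i =>
      -- d, m = divmod(...); indices i, i+1 are always in range, so the defaults are never used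
      let dm := (PySem.Int.divmod?
        ((PySem.List.pyGetD stationArea (i + 1) (0, 0)).1
          - ((PySem.List.pyGetD stationArea i (0, 0)).2 + 1)) (w * 2 + 1)).getD (0, 0)
      if dm.2 ≥ 1 then answer + (dm.1 + 1) else answer + dm.1) 0

-- ===== PORT B =====
-- transmitters needed for a gap of `gap` uncovered positions (Source B's cnt)
def pvAltCnt (base gap : Int) : Int :=
  let q := PySem.Int.floordiv gap base
  q + (if gap - q * base > 0 then 1 else 0)

-- Source B's rec: on a nonempty list returns (first coverage start, last coverage end,
-- transmitters for the gaps strictly inside); never called on [] (the [] arm is unreachable)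
def pvAltRec (n w base : Int) : List Int → Int × Int × Int
  | [] => (0, 0, 0)
  | [s] => (max (s - w) 0, min (s + w) n, 0)
  | s :: t :: r =>
    let mid := (s :: t :: r).length / 2
    let L := pvAltRec n w base ((s :: t :: r).take mid)
    let R := pvAltRec n w base ((s :: t :: r).drop mid)
    (L.1, R.2.1, L.2.2 + R.2.2 + pvAltCnt base (R.1 - L.2.1 - 1))
termination_by l => l.length
decreasing_by
  · simp [List.length_take]; omega
  · simp [List.length_drop]; omega

def solution_alt (n : Int) (stations : List Int) (w : Int) : Int :=
  let base := 2 * w + 1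
  match stations with
  | [] => pvAltCnt base (n + 1 - 1)
  | s :: t =>
    let R := pvAltRec n w base (s :: t)
    R.2.2 + pvAltCnt base (R.1 - 0 - 1) + pvAltCnt base (n + 1 - R.2.1 - 1)

-- ===== PRECONDITION & SPEC =====
def Spec_solution (n : Int) (stations : List Int) (w : Int) (out : Int) : Prop := out = solution_alt n stations w
instance (n : Int) (stations : List Int) (w : Int) (out : Int) : Decidable (Spec_solution n stations w out) := by unfold Spec_solution; infer_instance

-- ===== CLAIM (what is proved, stated in full; the proofs are below) =====
def Claim_equal_solution : Prop := ∀ (n : Int) (stations : List Int) (w : Int), Dom_solution n stations w → Spec_solution n stations w (solution n stations w)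

-- ===== LEMMAS AND PROOFS =====

-- transmitters added for the gap between a previous coverage end `pe` and the next start `st` (A's divmod form)
def pvGapCount (w pe st : Int) : Int :=
  PySem.Int.floordiv (st - (pe + 1)) (2 * w + 1) +
    (if PySem.Int.mod (st - (pe + 1)) (2 * w + 1) ≥ 1 then 1 else 0)

-- adjacent-pair accumulation over the remaining areas, carrying only the previous end
def pvAdj (n w : Int) (pe : Int) (l : List (Int × Int)) (acc : Int) : Int :=
  match l with
  | [] => acc
  | r :: t => pvAdj n w r.2 t (acc + pvGapCount w pe r.1)

def pvF (n w s : Int) : Int × Int :=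
  ((if s - w < 0 then (0 : Int) else s - w), (if s + w > n then n else s + w))

-- sum of the gap counts strictly inside an interval list
def pvInner (w : Int) : List (Int × Int) → Int
  | [] => 0
  | [_] => 0
  | x :: y :: t => pvGapCount w x.2 y.1 + pvInner w (y :: t)

theorem pvAltCnt_eq (w pe st : Int) : pvAltCnt (2 * w + 1) (st - pe - 1) = pvGapCount w pe st := by
  have hm := PySem.Int.floordiv_mul_add_mod (st - (pe + 1)) (2 * w + 1)
  have h1 : st - pe - 1 = st - (pe + 1) := by ring
  simp only [pvAltCnt, pvGapCount, h1]
  have : st - (pe + 1) - PySem.Int.floordiv (st - (pe + 1)) (2 * w + 1) * (2 * w + 1)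
      = PySem.Int.mod (st - (pe + 1)) (2 * w + 1) := by omega
  rw [this]
  split_ifs <;> omega

theorem pvFoldl_congr {α β : Type} (l : List β) (f g : α → β → α) (init : α)
    (h : ∀ a b, b ∈ l → f a b = g a b) : l.foldl f init = l.foldl g init := by
  induction l generalizing init with
  | nil => rfl
  | cons x t ih => simp only [List.foldl_cons, h init x (by simp)]; exact ih _ (fun a b hb => h a b (by simp [hb]))

theorem pvStep_eq (w a pe st : Int) :
    (if ((PySem.Int.divmod? (st - (pe + 1)) (w * 2 + 1)).getD (0, 0)).2 ≥ 1
     then a + (((PySem.Int.divmod? (st - (pe + 1)) (w * 2 + 1)).getD (0, 0)).1 + 1)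
     else a + ((PySem.Int.divmod? (st - (pe + 1)) (w * 2 + 1)).getD (0, 0)).1)
    = a + pvGapCount w pe st := by
  have h2 : w * 2 + 1 = 2 * w + 1 := by ring
  simp only [PySem.Int.divmod?, h2, if_neg (show ¬(2 * w + 1 = 0) by omega), Option.getD_some,
    pvGapCount, PySem.Int.floordiv, PySem.Int.mod]
  split_ifs <;> ring

theorem pvIdx_adj (n w : Int) (l : List (Int × Int)) (q : Int × Int) (acc : Int) :
    (List.range l.length).foldl
      (fun a (i : Nat) =>
        a + pvGapCount w ((q :: l).getD i (0, 0)).2 ((q :: l).getD (i + 1) (0, 0)).1) acc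
    = pvAdj n w q.2 l acc := by
  induction l generalizing q acc with
  | nil => simp [pvAdj]
  | cons r t ih =>
    simp only [List.length_cons, List.range_succ_eq_map, List.foldl_cons, List.foldl_map]
    simpa [pvAdj, List.getD] using ih r (acc + pvGapCount w q.2 r.1)

theorem pvInner_append (w : Int) (B : List (Int × Int)) (hB : B ≠ []) :
    ∀ (A : List (Int × Int)) (hA : A ≠ []),
    pvInner w (A ++ B) = pvInner w A + pvGapCount w (A.getLast hA).2 (B.head hB).1 + pvInner w B := by
  intro A
  induction A with
  | nil => intro hA; exact absurd rfl hA
  | cons x t ih =>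
    intro hA
    cases t with
    | nil =>
      cases B with
      | nil => exact absurd rfl hB
      | cons b bt =>
        show pvGapCount w x.2 b.1 + pvInner w (b :: bt) = 0 + pvGapCount w x.2 b.1 + pvInner w (b :: bt)
        ring
    | cons y u =>
      have ht : y :: u ≠ [] := by simp
      have hlast : (x :: y :: u).getLast hA = (y :: u).getLast ht := List.getLast_cons ht
      have h1 : pvInner w ((x :: y :: u) ++ B) = pvGapCount w x.2 y.1 + pvInner w ((y :: u) ++ B) := rfl
      have h2 : pvInner w (x :: y :: u) = pvGapCount w x.2 y.1 + pvInner w (y :: u) := rfl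
      rw [h1, ih ht, hlast, h2]
      ring

theorem pvAltRec_spec_aux (n w : Int) : ∀ (N : Nat) (l : List Int), l.length ≤ N → ∀ (h : l ≠ []),
    pvAltRec n w (2 * w + 1) l
      = ((pvF n w (l.head h)).1, (pvF n w (l.getLast h)).2, pvInner w (l.map (pvF n w))) := by
  intro N
  induction N with
  | zero =>
    intro l hl h
    cases l with
    | nil => exact absurd rfl h
    | cons a t => simp at hl
  | succ N ih =>
    intro l hl h
    match l with
    | [s] =>
      rw [show pvAltRec n w (2 * w + 1) [s] = (max (s - w) 0, min (s + w) n, 0) from by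
        rw [pvAltRec]]
      refine Prod.ext ?_ (Prod.ext ?_ ?_)
      · show max (s - w) 0 = if s - w < 0 then (0 : Int) else s - w
        split_ifs <;> omega
      · show min (s + w) n = if s + w > n then n else s + w
        split_ifs <;> omega
      · rfl
    | s :: t :: r =>
      have hmid1 : 1 ≤ (s :: t :: r).length / 2 := by simp; omega
      have hmid2 : (s :: t :: r).length / 2 < (s :: t :: r).length := by simp; omega
      have hTne : (s :: t :: r).take ((s :: t :: r).length / 2) ≠ [] :=
        List.ne_nil_of_length_pos (by simp only [List.length_take, List.length_cons]; omega)
      have hDne : (s :: t :: r).drop ((s :: t :: r).length / 2) ≠ [] :=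
        List.ne_nil_of_length_pos (by simp only [List.length_drop, List.length_cons]; omega)
      have hlT : ((s :: t :: r).take ((s :: t :: r).length / 2)).length ≤ N := by
        simp only [List.length_take]; simp only [List.length_cons] at *; omega
      have hlD : ((s :: t :: r).drop ((s :: t :: r).length / 2)).length ≤ N := by
        simp only [List.length_drop]; simp only [List.length_cons] at *; omega
      rw [show pvAltRec n w (2 * w + 1) (s :: t :: r)
          = ((pvAltRec n w (2 * w + 1) ((s :: t :: r).take ((s :: t :: r).length / 2))).1,
             (pvAltRec n w (2 * w + 1) ((s :: t :: r).drop ((s :: t :: r).length / 2))).2.1,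
             (pvAltRec n w (2 * w + 1) ((s :: t :: r).take ((s :: t :: r).length / 2))).2.2
               + (pvAltRec n w (2 * w + 1) ((s :: t :: r).drop ((s :: t :: r).length / 2))).2.2
               + pvAltCnt (2 * w + 1)
                   ((pvAltRec n w (2 * w + 1) ((s :: t :: r).drop ((s :: t :: r).length / 2))).1
                     - (pvAltRec n w (2 * w + 1) ((s :: t :: r).take ((s :: t :: r).length / 2))).2.1 - 1))
          from by rw [pvAltRec]]
      rw [ih _ hlT hTne, ih _ hlD hDne]
      have hsplit : (s :: t :: r) = (s :: t :: r).take ((s :: t :: r).length / 2)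
          ++ (s :: t :: r).drop ((s :: t :: r).length / 2) := (List.take_append_drop _ _).symm
      have hhead : ((s :: t :: r).take ((s :: t :: r).length / 2)).head hTne = s := by
        rw [List.head_take hTne]; rfl
      have hlast : ((s :: t :: r).drop ((s :: t :: r).length / 2)).getLast hDne
          = (s :: t :: r).getLast (by simp) := by
        rw [List.getLast_eq_getElem hDne, List.getLast_eq_getElem (by simp)]
        simp only [List.getElem_drop]
        congr 1
        simp only [List.length_drop, List.length_cons]
        omega
      have hinner : pvInner w ((s :: t :: r).map (pvF n w))
          = pvInner w (((s :: t :: r).take ((s :: t :: r).length / 2)).map (pvF n w))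
            + pvGapCount w
                ((((s :: t :: r).take ((s :: t :: r).length / 2)).map (pvF n w)).getLast (by simp only [ne_eq, List.map_eq_nil_iff]; exact hTne)).2
                ((((s :: t :: r).drop ((s :: t :: r).length / 2)).map (pvF n w)).head (by simp only [ne_eq, List.map_eq_nil_iff]; exact hDne)).1
            + pvInner w (((s :: t :: r).drop ((s :: t :: r).length / 2)).map (pvF n w)) := by
        conv_lhs => rw [hsplit]
        rw [List.map_append]
        exact pvInner_append w _ (by simp only [ne_eq, List.map_eq_nil_iff]; exact hDne) _ (by simp only [ne_eq, List.map_eq_nil_iff]; exact hTne)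
      refine Prod.ext ?_ (Prod.ext ?_ ?_)
      · show (pvF n w (((s :: t :: r).take ((s :: t :: r).length / 2)).head hTne)).1
            = (pvF n w ((s :: t :: r).head h)).1
        rw [hhead]; rfl
      · show (pvF n w (((s :: t :: r).drop ((s :: t :: r).length / 2)).getLast hDne)).2
            = (pvF n w ((s :: t :: r).getLast h)).2
        rw [hlast]
      · show _ = pvInner w ((s :: t :: r).map (pvF n w))
        rw [hinner, List.getLast_map, List.head_map, pvAltCnt_eq]
        ring

theorem pvAltRec_spec (n w : Int) (l : List Int) (h : l ≠ []) :
    pvAltRec n w (2 * w + 1) l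
      = ((pvF n w (l.head h)).1, (pvF n w (l.getLast h)).2, pvInner w (l.map (pvF n w))) :=
  pvAltRec_spec_aux n w l.length l le_rfl h

theorem pvAdj_split (n w : Int) : ∀ (ivs : List (Int × Int)) (h : ivs ≠ []) (pe acc : Int),
    pvAdj n w pe (ivs ++ [(n + 1, n + 1)]) acc
      = acc + pvGapCount w pe (ivs.head h).1 + pvInner w ivs
          + pvGapCount w (ivs.getLast h).2 (n + 1) := by
  intro ivs
  induction ivs with
  | nil => intro h; exact absurd rfl h
  | cons x t ih =>
    intro h pe acc
    cases t with
    | nil =>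
      show pvAdj n w x.2 [(n+1, n+1)] (acc + pvGapCount w pe x.1)
          = acc + pvGapCount w pe x.1 + pvInner w [x] + pvGapCount w x.2 (n + 1)
      show acc + pvGapCount w pe x.1 + pvGapCount w x.2 (n + 1)
          = acc + pvGapCount w pe x.1 + 0 + pvGapCount w x.2 (n + 1)
      ring
    | cons y u =>
      have hne : (y :: u : List (Int × Int)) ≠ [] := by simp
      have h1 : pvAdj n w pe ((x :: y :: u) ++ [(n+1, n+1)]) acc
          = pvAdj n w x.2 ((y :: u) ++ [(n+1, n+1)]) (acc + pvGapCount w pe x.1) := rfl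
      have h2 : pvInner w (x :: y :: u) = pvGapCount w x.2 y.1 + pvInner w (y :: u) := rfl
      rw [h1, ih hne x.2 (acc + pvGapCount w pe x.1), h2,
        show (x :: y :: u).getLast h = (y :: u).getLast hne from List.getLast_cons hne]
      simp only [List.head_cons]
      ring

-- A's fold builds exactly the mapped intervals
theorem pvBuild_eq (n w : Int) (stations : List Int) :
    stations.foldl (fun acc station =>
      let start := station - w
      let start := if start < 0 then (0 : Int) else start
      let e := station + w
      let e := if e > n then n else e
      acc ++ [(start, e)]) [((0 : Int), (0 : Int))]
    = ((0 : Int), (0 : Int)) :: stations.map (pvF n w) := by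
  rw [PySem.List.foldl_append_singleton_eq_map]
  rfl

-- A equals the adjacent-pair accumulation
theorem pvA_eq_adj (n : Int) (stations : List Int) (w : Int) :
    solution n stations w = pvAdj n w 0 (stations.map (pvF n w) ++ [(n + 1, n + 1)]) 0 := by
  unfold solution
  simp only [pvBuild_eq]
  show (PySem.List.pyRange 0 (((((0:Int),(0:Int)) :: stations.map (pvF n w) ++ [(n+1,n+1)]).length : Int) - 1) 1).foldl _ 0 = _
  have hlen : (((((0:Int),(0:Int)) :: stations.map (pvF n w) ++ [(n+1,n+1)]).length : Int) - 1)
      = (((stations.map (pvF n w) ++ [(n+1,n+1)]).length : Nat) : Int) := by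
    simp
  rw [hlen, PySem.List.pyRange_zero_natCast, List.foldl_map]
  rw [pvFoldl_congr _ _
      (fun a (i : Nat) => a + pvGapCount w
        ((((0:Int),(0:Int)) :: (stations.map (pvF n w) ++ [(n+1,n+1)])).getD i (0, 0)).2
        ((((0:Int),(0:Int)) :: (stations.map (pvF n w) ++ [(n+1,n+1)])).getD (i + 1) (0, 0)).1) 0
      (by
        intro a k _
        have hk1 : ((k : Int) + 1) = ((k + 1 : Nat) : Int) := by push_cast; ring
        rw [hk1, PySem.List.pyGetD_natCast, PySem.List.pyGetD_natCast]
        exact pvStep_eq w a _ _)]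
  rw [pvIdx_adj n w (stations.map (pvF n w) ++ [(n+1,n+1)]) ((0:Int),(0:Int)) 0]

-- ===== VERDICT (by name: the statement is the Claim_ definition above) =====
theorem solution_spec : Claim_equal_solution := by
  intro n stations w _
  unfold Spec_solution
  rw [pvA_eq_adj]
  cases stations with
  | nil =>
    simp only [solution_alt, List.map_nil, List.nil_append, pvAdj]
    rw [show ((n : Int) + 1 - 1) = (n + 1) - 0 - 1 by ring, pvAltCnt_eq]
    ring
  | cons s t =>
    have hne : (s :: t).map (pvF n w) ≠ [] := by simp
    rw [pvAdj_split n w _ hne 0 0]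
    simp only [solution_alt]
    rw [pvAltRec_spec n w (s :: t) (by simp)]
    rw [List.head_map, List.getLast_map]
    rw [show ((pvF n w ((s :: t).head (by simp))).1 - 0 - 1)
        = (pvF n w ((s :: t).head (by simp))).1 - 0 - 1 from rfl]
    rw [show (pvF n w ((s :: t).head (by simp))).1 - 0 - 1
        = (pvF n w ((s :: t).head (by simp))).1 - (0:Int) - 1 from rfl, pvAltCnt_eq]
    rw [show (n + 1 - (pvF n w ((s :: t).getLast (by simp))).2 - 1)
        = (n + 1) - (pvF n w ((s :: t).getLast (by simp))).2 - 1 from rfl, pvAltCnt_eq]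
    ring
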